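-- pv_equiv track=rewrite | github.com/gribskov/biocomputing | utils/read_dist.py | condense_seq
-- ===== SOURCE A (Python) =====
-- def condense_seq(seq):
--     """---------------------------------------------------------------------------------------------
--     condense the seq array by removing consecutive positions with the same value.  This allows
--     easier printing. For plotting, each interval ends at the indicated position.
--
--     pos1, val1
--     pos2, val2
--     ...
--
--     SAM files use a 1 origin, so the first interval is 1 to pos1 with value val1, the second is
--     pos1 + 1 to pos2 with val2, etc.
--
--     :param seq: list of int, coverage at each base
--     :return: list of tuples, (pos, val)
--     ---------------------------------------------------------------------------------------------"""
--     compressed = []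
--     cover = seq[1]
--     for pos in range(2, len(seq)):
--         if seq[pos] != cover:
--             compressed.append((pos - 1, cover))
--         cover = seq[pos]
--
--     return compressed
-- ===== SOURCE B (Python) =====
-- def condense_seq(seq):
--     """Two staged passes: run-length encode seq[1:] into (value, length) runs,
--     then convert cumulative run lengths into (end_pos, value) pairs, dropping
--     the final run (it has no following boundary)."""
--     runs = []
--     for v in seq[1:]:
--         if runs and runs[-1][0] == v:
--             runs[-1][1] += 1
--         else:
--             runs.append([v, 1])
--     out = []
--     end = 0
--     for v, length in runs[:-1]:
--         end += length
--         out.append((end, v))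
--     return out
-- ===== Notes on version B (the rewrite author's own statement) =====
-- stated objective: alternative
-- what changed: Replaces A's single boundary-detecting loop with a cover accumulator by two staged passes: run-length encode seq[1:] into (value, length) runs, then prefix-sum the run lengths to emit (end_pos, value) for every run but the last.
-- outside the precondition, e.g. on condense_seq([1]): A raises IndexError, B returns []
import Mathlib
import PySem

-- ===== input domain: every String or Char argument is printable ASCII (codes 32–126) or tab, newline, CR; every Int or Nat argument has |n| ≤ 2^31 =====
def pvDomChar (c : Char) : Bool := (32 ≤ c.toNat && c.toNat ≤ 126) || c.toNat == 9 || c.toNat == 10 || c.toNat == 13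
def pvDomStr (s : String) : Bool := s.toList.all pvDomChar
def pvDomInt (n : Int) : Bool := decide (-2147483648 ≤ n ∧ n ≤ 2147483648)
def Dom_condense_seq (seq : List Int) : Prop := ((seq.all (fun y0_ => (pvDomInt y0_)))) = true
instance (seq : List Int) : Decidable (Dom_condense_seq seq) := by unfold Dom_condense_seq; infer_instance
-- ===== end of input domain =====

-- B replaces A's boundary-detecting loop by two staged passes: run-length encode seq[1:],
-- then prefix-sum the run lengths into (end_pos, value) pairs, dropping the last run
-- (objective: alternative).

-- ===== PORT A =====
-- seq[i]: under Pre_ every index read is in range, so the IndexError case (none) never occurs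
def pvGet (seq : List Int) (i : Int) : Int := (PySem.List.pyGet? seq i).getD 0

-- loop body: 'if seq[pos] != cover: compressed.append((pos-1, cover)); cover = seq[pos]'
def pvStep (seq : List Int) (st : List (Int × Int) × Int) (pos : Int) : List (Int × Int) × Int :=
  (if pvGet seq pos ≠ st.2 then st.1 ++ [(pos - 1, st.2)] else st.1, pvGet seq pos)

def condense_seq (seq : List Int) : List (Int × Int) :=
  ((PySem.List.pyRange 2 (seq.length : Int) 1).foldl (pvStep seq) ([], pvGet seq 1)).1

-- ===== PORT B =====
-- stage 1 body: 'if runs and runs[-1][0] == v: runs[-1][1] += 1 else: runs.append([v, 1])'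
def pvRunStep (runs : List (Int × Int)) (v : Int) : List (Int × Int) :=
  match runs.getLast? with
  | some (u, c) => if u = v then runs.dropLast ++ [(u, c + 1)] else runs ++ [(v, 1)]
  | none => [(v, 1)]

-- stage 2 body: 'end += length; out.append((end, v))'
def pvEmitStep (st : List (Int × Int) × Int) (r : Int × Int) : List (Int × Int) × Int :=
  (st.1 ++ [(st.2 + r.2, r.1)], st.2 + r.2)

def condense_seq_alt (seq : List Int) : List (Int × Int) :=
  let runs := (PySem.List.slice seq (some 1) none).foldl pvRunStep []
  (runs.dropLast.foldl pvEmitStep ([], 0)).1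

-- ===== PRECONDITION & SPEC =====
-- A reads seq[1] unconditionally, raising IndexError on lists shorter than 2
def Pre_condense_seq (seq : List Int) : Prop := 2 ≤ seq.length
instance (seq : List Int) : Decidable (Pre_condense_seq seq) := by unfold Pre_condense_seq; infer_instance
def pvWitness_condense_seq : List Int := [3, 3, 1]

def Spec_condense_seq (seq : List Int) (out : List (Int × Int)) : Prop := out = condense_seq_alt seq
instance (seq : List Int) (out : List (Int × Int)) : Decidable (Spec_condense_seq seq out) := by unfold Spec_condense_seq; infer_instance

-- ===== CLAIM (what is proved, stated in full; the proofs are below) =====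
def Claim_equal_condense_seq : Prop := ∀ (seq : List Int), Dom_condense_seq seq → Pre_condense_seq seq → Spec_condense_seq seq (condense_seq seq)

-- ===== LEMMAS AND PROOFS =====

-- output of stage 2 over a full run list (no dropLast): used to state the loop invariant
def pvEmitFull (rs : List (Int × Int)) : List (Int × Int) := (rs.foldl pvEmitStep ([], 0)).1

theorem pvEmit_snd (xs : List (Int × Int)) (l : List (Int × Int)) (e : Int) :
    (xs.foldl pvEmitStep (l, e)).2 = e + (xs.map Prod.snd).sum := by
  induction xs generalizing l e with
  | nil => simp
  | cons x xs ih => simp [pvEmitStep, ih, add_assoc]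

theorem pvEmitFull_concat (rs : List (Int × Int)) (r : Int × Int) :
    pvEmitFull (rs ++ [r]) = pvEmitFull rs ++ [((rs.map Prod.snd).sum + r.2, r.1)] := by
  simp only [pvEmitFull, List.foldl_append, List.foldl_cons, List.foldl_nil, pvEmitStep,
    pvEmit_snd]
  simp

theorem pvGet_nat (seq : List Int) (n : Nat) (h : n < seq.length) :
    pvGet seq (n : Int) = seq[n] := by
  simp [pvGet, PySem.List.pyGet?_natCast, List.getElem?_eq_getElem h]

-- the loop invariant: after processing range(2, n) the run list of (seq.take n)[1:] is
-- rs ++ [(u, c)] with u = seq[n-1], the run lengths sum to n-1, and A's state is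
-- (pvEmitFull rs, u)
theorem pv_main (seq : List Int) (n : Nat) (h2 : 2 ≤ n) (hle : n ≤ seq.length) :
    ∃ rs u c,
      ((seq.take n).drop 1).foldl pvRunStep [] = rs ++ [(u, c)] ∧
      u = pvGet seq ((n : Int) - 1) ∧
      (rs.map Prod.snd).sum + c = (n : Int) - 1 ∧
      ((PySem.List.pyRange 2 (n : Int) 1).foldl (pvStep seq) ([], pvGet seq 1)) = (pvEmitFull rs, u) := by
  induction n, h2 using Nat.le_induction with
  | base =>
      refine ⟨[], pvGet seq 1, 1, ?_, by norm_num, by simp, ?_⟩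
      · have h1 : 1 < seq.length := by omega
        have ht : (seq.take 2).drop 1 = [seq[1]] := by
          rw [List.drop_take]
          have := List.take_add_one (l := seq.drop 1) (i := 0)
          simpa [List.getElem?_eq_getElem (by simpa using h1 : 0 < (seq.drop 1).length),
            List.getElem?_eq_getElem h1] using this
        have hg : pvGet seq (1 : Int) = seq[1] := by simpa using pvGet_nat seq 1 h1
        rw [ht]
        simp [pvRunStep, hg]
      · rw [PySem.List.pyRange_one_eq_nil (by norm_num)]
        simp [pvEmitFull]
  | succ n hn ih =>
      have hlt : n < seq.length := by omega
      obtain ⟨rs, u, c, hruns, hu, hsum, hfold⟩ := ih (by omega)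
      have htake : (seq.take (n + 1)).drop 1 = (seq.take n).drop 1 ++ [seq[n]] := by
        rw [List.take_add_one, List.getElem?_eq_getElem hlt]
        rw [List.drop_append_of_le_length (by simp; omega)]
        simp
      have hc : ((n + 1 : Nat) : Int) = (n : Int) + 1 := by push_cast; ring
      have h2n : (2 : Int) ≤ (n : Int) := by exact_mod_cast hn
      have hget : pvGet seq (n : Int) = seq[n] := pvGet_nat seq n hlt
      have hruns' : ((seq.take (n + 1)).drop 1).foldl pvRunStep []
          = pvRunStep (rs ++ [(u, c)]) seq[n] := by
        rw [htake, List.foldl_append, hruns]; simp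
      rw [hc, PySem.List.pyRange_one_succ_right h2n]
      rw [List.foldl_append, hfold]
      by_cases h : u = seq[n]
      · refine ⟨rs, u, c + 1, ?_, ?_, by omega, ?_⟩
        · rw [hruns', pvRunStep]
          simp [h]
        · rw [show ((n : Int) + 1 - 1) = (n : Int) from by ring, hget]; exact h
        · simp [pvStep, hget, ← h, hu]
      · refine ⟨rs ++ [(u, c)], seq[n], 1, ?_, ?_, ?_, ?_⟩
        · rw [hruns', pvRunStep]
          simp [h]
        · rw [show ((n : Int) + 1 - 1) = (n : Int) from by ring, hget]
        · simp; omega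
        · rw [pvEmitFull_concat]
          simp only [List.foldl_cons, List.foldl_nil, pvStep, hget]
          have hne : seq[n] ≠ u := fun hh => h hh.symm
          rw [if_pos hne, hsum]

-- ===== VERDICT (by name: the statement is the Claim_ definition above) =====
theorem condense_seq_spec : Claim_equal_condense_seq := by
  intro seq _ hpre
  unfold Spec_condense_seq condense_seq condense_seq_alt
  obtain ⟨rs, u, c, hruns, _, _, hfold⟩ := pv_main seq seq.length hpre le_rfl
  rw [hfold]
  rw [PySem.List.slice_from_one]
  have : seq.tail = (seq.take seq.length).drop 1 := by simp
  rw [this, hruns]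
  simp [pvEmitFull]
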